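-- pv_equiv track=rewrite | github.com/paulecode/se01 | ex3.py | getTopLiquidLength
-- ===== SOURCE A (Python) =====
-- def getTopLiquid(beaker):
--     beaker = beaker.copy()
--     while beaker:
--         topLiquid = beaker.pop()
--         if topLiquid == 0:
--             continue
--         else:
--             return topLiquid
--
--     return 0
--
-- def getTopLiquidLength(beaker):
--     beaker = beaker.copy()
--     length = 0
--     color = getTopLiquid(beaker)
--     while beaker:
--         topLiquid = beaker.pop()
--         if topLiquid == 0:
--             continue
--         if topLiquid == color:
--             length += 1
--         else:
--             break
--     return length
-- ===== SOURCE B (Python) =====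
-- import itertools
--
-- def getTopLiquidLength(beaker):
--     filtered = [x for x in reversed(beaker) if x != 0]
--     if not filtered:
--         return 0
--     color = filtered[0]
--     return len(list(itertools.takewhile(lambda x: x == color, filtered)))
-- ===== Notes on version B (the rewrite author's own statement) =====
-- stated objective: simpler
-- what changed: Replaces the copy-and-pop while loops (separate getTopLiquid helper plus a counting pop loop) with a two-phase pass: build the zero-stripped top-down list once, then take the length of its leading run with takewhile.
import Mathlib
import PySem

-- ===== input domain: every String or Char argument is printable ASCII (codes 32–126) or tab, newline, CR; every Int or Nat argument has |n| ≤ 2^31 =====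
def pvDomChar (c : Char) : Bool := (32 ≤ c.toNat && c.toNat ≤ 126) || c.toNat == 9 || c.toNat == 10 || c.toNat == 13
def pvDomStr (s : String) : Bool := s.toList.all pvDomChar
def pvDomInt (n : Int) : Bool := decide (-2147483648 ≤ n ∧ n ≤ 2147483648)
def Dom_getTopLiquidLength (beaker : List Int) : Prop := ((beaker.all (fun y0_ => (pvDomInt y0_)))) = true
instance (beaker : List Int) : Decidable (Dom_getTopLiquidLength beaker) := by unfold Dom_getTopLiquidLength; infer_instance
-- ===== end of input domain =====

-- B replaces A's two copy-and-pop while loops by a filter-then-takewhile two-phase pass (objective: simpler).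

-- ===== PORT A =====
-- A's getTopLiquid: while beaker: pop from the end, skip zeros, return first non-zero; 0 if none.
-- Popping from the end = structural recursion on the reversed list.
def getTopLiquidLoop : List Int → Int
  | [] => 0
  | t :: rest => if t = 0 then getTopLiquidLoop rest else t

-- A's counting while loop, popping from the end of the (copied) beaker with accumulator `length`.
def getTopLiquidLengthLoop (color : Int) : List Int → Int → Int
  | [], len => len
  | t :: rest, len =>
      if t = 0 then getTopLiquidLengthLoop color rest len
      else if t = color then getTopLiquidLengthLoop color rest (len + 1)
      else len

def getTopLiquidLength (beaker : List Int) : Int :=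
  let rev := beaker.reverse
  let color := getTopLiquidLoop rev
  getTopLiquidLengthLoop color rev 0

-- ===== PORT B =====
def getTopLiquidLength_alt (beaker : List Int) : Int :=
  let filtered := beaker.reverse.filter (fun x => x ≠ 0)
  match filtered with
  | [] => 0
  | color :: _ => ((filtered.takeWhile (fun x => x = color)).length : Int)

-- ===== PRECONDITION & SPEC =====
def Spec_getTopLiquidLength (beaker : List Int) (out : Int) : Prop := out = getTopLiquidLength_alt beaker
instance (beaker : List Int) (out : Int) : Decidable (Spec_getTopLiquidLength beaker out) := by unfold Spec_getTopLiquidLength; infer_instance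

-- ===== CLAIM (what is proved, stated in full; the proofs are below) =====
def Claim_equal_getTopLiquidLength : Prop := ∀ (beaker : List Int), Dom_getTopLiquidLength beaker → Spec_getTopLiquidLength beaker (getTopLiquidLength beaker)

-- ===== LEMMAS AND PROOFS =====

-- A's first loop returns the head of the zero-stripped list (0 if empty).
theorem getTopLiquidLoop_eq_filter (l : List Int) :
    getTopLiquidLoop l = (l.filter (fun x => x ≠ 0)).headD 0 := by
  induction l with
  | nil => rfl
  | cons t rest ih =>
    by_cases h : t = 0 <;> simp [getTopLiquidLoop, h, ih]

-- If every element is 0, the counting loop returns its accumulator.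
theorem lengthLoop_all_zero (c : Int) (l : List Int) (len : Int)
    (h : ∀ a ∈ l, a = 0) :
    getTopLiquidLengthLoop c l len = len := by
  induction l generalizing len with
  | nil => rfl
  | cons t rest ih =>
    have ht : t = 0 := h t (List.mem_cons_self ..)
    simp only [getTopLiquidLengthLoop, if_pos ht]
    exact ih len (fun a ha => h a (List.mem_cons_of_mem _ ha))

-- For a non-zero color, the counting loop adds the leading run length of the zero-stripped list.
theorem lengthLoop_eq_takeWhile (c : Int) (l : List Int) (len : Int) :
    getTopLiquidLengthLoop c l len =
      len + (((l.filter (fun x => x ≠ 0)).takeWhile (fun x => x = c)).length : Int) := by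
  induction l generalizing len with
  | nil => simp [getTopLiquidLengthLoop]
  | cons t rest ih =>
    by_cases ht : t = 0
    · simp [getTopLiquidLengthLoop, ht, ih]
    · by_cases htc : t = c
      · rw [List.filter_cons_of_pos (by simpa using ht)]
        rw [List.takeWhile_cons_of_pos (by simpa using htc)]
        simp only [getTopLiquidLengthLoop, if_neg ht, if_pos htc, ih, List.length_cons]
        push_cast
        ring
      · rw [List.filter_cons_of_pos (by simpa using ht)]
        rw [List.takeWhile_cons_of_neg (by simpa using htc)]
        simp [getTopLiquidLengthLoop, ht, htc]

-- The whole computation, for an arbitrary (already-reversed) list.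
theorem main_aux (l : List Int) :
    getTopLiquidLengthLoop ((l.filter (fun x => x ≠ 0)).headD 0) l 0 =
      (match l.filter (fun x => x ≠ 0) with
       | [] => (0 : Int)
       | color :: _ =>
          (((l.filter (fun x => x ≠ 0)).takeWhile (fun x => x = color)).length : Int)) := by
  cases hf : l.filter (fun x => x ≠ 0) with
  | nil =>
    have hz : ∀ a ∈ l, a = 0 := by
      intro a ha
      by_contra hne
      have : a ∈ l.filter (fun x => x ≠ 0) := List.mem_filter.2 ⟨ha, by simpa using hne⟩
      rw [hf] at this
      exact absurd this (List.not_mem_nil)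
    simp [lengthLoop_all_zero _ _ _ hz]
  | cons c rest =>
    rw [List.headD_cons, lengthLoop_eq_takeWhile c, hf]
    simp

-- ===== VERDICT (by name: the statement is the Claim_ definition above) =====
theorem getTopLiquidLength_spec : Claim_equal_getTopLiquidLength := by
  intro beaker _
  unfold Spec_getTopLiquidLength getTopLiquidLength getTopLiquidLength_alt
  simp only [getTopLiquidLoop_eq_filter]
  exact main_aux beaker.reverse
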